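-- pv_equiv track=rewrite | github.com/kwadrat/angora | eg_bag.py | easy_guess
-- ===== SOURCE A (Python) =====
-- def easy_guess(one_ls, line_size):
--     pos_left = 0
--     out_ls = []
--     delta = line_size - (sum(one_ls) + len(one_ls) - 1)
--     if delta >= 0:
--         for one_size in one_ls:
--             possible_width = one_size - delta
--             if possible_width > 0:
--                 first_marked = pos_left + delta
--                 first_stopped = pos_left + one_size
--                 one_tpl = (first_marked, first_stopped)
--                 out_ls.append(one_tpl)
--             pos_left += one_size  # Przeskocz za czarny ciąg
--             pos_left += 1  # Przeskocz kratkę odstępu między czarnymi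
--     return out_ls
-- ===== SOURCE B (Python) =====
-- def easy_guess(one_ls, line_size):
--     # Infeasible: the blocks plus mandatory gaps do not fit on the line.
--     if line_size - sum(one_ls) - len(one_ls) + 1 < 0:
--         return []
--     # Leftmost packing: end position (exclusive) of each block, forward pass.
--     left_end = []
--     pos = 0
--     for size in one_ls:
--         pos += size
--         left_end.append(pos)
--         pos += 1
--     # Rightmost packing, scanned right-to-left; a cell is guaranteed filled
--     # iff it lies in both packings of the same block, i.e. the intersection
--     # [rightmost_start, leftmost_end) is nonempty. Output built back-to-front.
--     out = []
--     rend = line_size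
--     for size, le in reversed(list(zip(one_ls, left_end))):
--         rs = rend - size
--         if rs < le:
--             out.insert(0, (rs, le))
--         rend = rs - 1
--     return out
-- ===== Notes on version B (the rewrite author's own statement) =====
-- stated objective: alternative
-- what changed: Replaces A's single forward loop threading a pos_left accumulator and per-block slack test (size - delta > 0) by the classic two-packing intersection: a forward pass records each block's leftmost-packing end, then a right-to-left scan maintains the rightmost packing and prepends each nonempty intersection [rightmost_start, leftmost_end), building the output back-to-front with no per-block delta.
import Mathlib
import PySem

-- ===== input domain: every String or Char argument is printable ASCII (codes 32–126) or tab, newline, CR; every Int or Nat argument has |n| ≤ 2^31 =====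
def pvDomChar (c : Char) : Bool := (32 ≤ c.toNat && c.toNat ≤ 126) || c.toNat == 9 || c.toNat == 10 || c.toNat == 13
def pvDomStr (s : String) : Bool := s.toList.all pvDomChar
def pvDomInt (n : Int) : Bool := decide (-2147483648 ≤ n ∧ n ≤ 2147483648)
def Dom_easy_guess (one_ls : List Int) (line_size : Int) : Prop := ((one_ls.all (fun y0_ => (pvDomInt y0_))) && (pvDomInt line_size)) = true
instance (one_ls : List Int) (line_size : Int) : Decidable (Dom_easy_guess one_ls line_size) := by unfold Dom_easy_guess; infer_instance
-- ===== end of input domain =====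

-- B replaces A's forward slack-test loop by intersecting the leftmost and rightmost
-- packings (forward pass for leftmost ends, right-to-left scan building output
-- back-to-front); return values proved equal on all inputs (objective: alternative).


-- ===== PORT A =====
-- A: one forward loop threading pos_left, appending when one_size - delta > 0
def easy_guess (one_ls : List Int) (line_size : Int) : List (Int × Int) :=
  let delta := line_size - (one_ls.foldl (· + ·) 0 + (one_ls.length : Int) - 1)
  if delta ≥ 0 then
    (one_ls.foldl
      (fun (st : Int × List (Int × Int)) one_size =>
        let pos_left := st.1
        let possible_width := one_size - delta
        let out_ls := if possible_width > 0 then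
            st.2 ++ [(pos_left + delta, pos_left + one_size)]
          else st.2
        (pos_left + one_size + 1, out_ls))
      (0, [])).2
  else []

-- ===== PORT B =====
-- B: leftmost-packing ends in a forward pass, then a right-to-left scan of the
-- rightmost packing, prepending each nonempty intersection (output back-to-front)
def easy_guess_alt (one_ls : List Int) (line_size : Int) : List (Int × Int) :=
  if line_size - one_ls.foldl (· + ·) 0 - (one_ls.length : Int) + 1 < 0 then []
  else
    let left_end := (one_ls.foldl
      (fun (st : List Int × Int) size =>
        (st.1 ++ [st.2 + size], st.2 + size + 1)) ([], 0)).1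
    ((one_ls.zip left_end).reverse.foldl
      (fun (st : List (Int × Int) × Int) p =>
        let rs := st.2 - p.1
        ((if rs < p.2 then (rs, p.2) :: st.1 else st.1), rs - 1))
      ([], line_size)).1

-- ===== PRECONDITION & SPEC =====
def Spec_easy_guess (one_ls : List Int) (line_size : Int) (out : List (Int × Int)) : Prop := out = easy_guess_alt one_ls line_size
instance (one_ls : List Int) (line_size : Int) (out : List (Int × Int)) : Decidable (Spec_easy_guess one_ls line_size out) := by unfold Spec_easy_guess; infer_instance

-- ===== CLAIM (what is proved, stated in full; the proofs are below) =====
def Claim_equal_easy_guess : Prop := ∀ (one_ls : List Int) (line_size : Int), Dom_easy_guess one_ls line_size → Spec_easy_guess one_ls line_size (easy_guess one_ls line_size)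

-- ===== LEMMAS AND PROOFS =====
-- common characterisation: intervals generated structurally from a running position
def egGen (delta : Int) : List Int → Int → List (Int × Int)
  | [], _ => []
  | s :: rest, pos =>
      (if s - delta > 0 then [(pos + delta, pos + s)] else []) ++ egGen delta rest (pos + s + 1)

-- leftmost-packing end positions, generated structurally
def egEnds : List Int → Int → List Int
  | [], _ => []
  | s :: rest, pos => (pos + s) :: egEnds rest (pos + s + 1)

theorem eg_fold_A (delta : Int) (ls : List Int) : ∀ (pos : Int) (acc : List (Int × Int)),
    (ls.foldl
      (fun (st : Int × List (Int × Int)) one_size =>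
        let pos_left := st.1
        let possible_width := one_size - delta
        let out_ls := if possible_width > 0 then
            st.2 ++ [(pos_left + delta, pos_left + one_size)]
          else st.2
        (pos_left + one_size + 1, out_ls))
      (pos, acc)).2 = acc ++ egGen delta ls pos := by
  induction ls with
  | nil => intro pos acc; simp [egGen]
  | cons s rest ih =>
      intro pos acc
      simp only [List.foldl_cons, egGen, ih]
      split <;> simp

theorem eg_fold_ends (ls : List Int) : ∀ (pos : Int) (acc : List Int),
    (ls.foldl
      (fun (st : List Int × Int) size =>
        (st.1 ++ [st.2 + size], st.2 + size + 1)) (acc, pos)).1 = acc ++ egEnds ls pos := by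
  induction ls with
  | nil => intro pos acc; simp [egEnds]
  | cons s rest ih =>
      intro pos acc
      simp [egEnds, ih]

theorem eg_foldl_add (ls : List Int) : ∀ (a : Int),
    ls.foldl (· + ·) a = a + ls.foldl (· + ·) 0 := by
  induction ls with
  | nil => intro a; simp
  | cons t ts ih =>
      intro a
      simp only [List.foldl_cons]
      rw [ih (a + t), ih (0 + t)]; ring

-- the right-to-left scan over (size, leftmost_end) pairs produces egGen
theorem eg_foldr_B (ls : List Int) : ∀ (pos d L : Int),
    L = pos + d + ls.foldl (· + ·) 0 + (ls.length : Int) - 1 →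
    ((ls.zip (egEnds ls pos)).foldr
      (fun p (st : List (Int × Int) × Int) =>
        let rs := st.2 - p.1
        ((if rs < p.2 then (rs, p.2) :: st.1 else st.1), rs - 1))
      ([], L)) = (egGen d ls pos, pos + d - 1) := by
  induction ls with
  | nil =>
      intro pos d L hL
      simp [egEnds, egGen] at hL ⊢
      omega
  | cons s rest ih =>
      intro pos d L hL
      have hsum : (s :: rest).foldl (· + ·) 0 = s + rest.foldl (· + ·) 0 := by
        simp only [List.foldl_cons, Int.zero_add]; exact eg_foldl_add rest s
      have hL' : L = (pos + s + 1) + d + rest.foldl (· + ·) 0 + (rest.length : Int) - 1 := by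
        rw [hsum] at hL; simp [List.length_cons] at hL; omega
      simp only [egEnds, List.zip_cons_cons, List.foldr_cons, ih (pos + s + 1) d L hL']
      simp only [egGen]
      have hrs : pos + s + 1 + d - 1 - s = pos + d := by ring
      rw [hrs]
      by_cases h : pos + d < pos + s
      · rw [if_pos h, if_pos (by omega)]; simp
      · rw [if_neg h, if_neg (by omega)]; simp

-- ===== VERDICT (by name: the statement is the Claim_ definition above) =====
theorem easy_guess_spec : Claim_equal_easy_guess := by
  intro one_ls line_size _
  unfold Spec_easy_guess easy_guess easy_guess_alt
  simp only
  by_cases h : line_size - (one_ls.foldl (· + ·) 0 + (one_ls.length : Int) - 1) ≥ 0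
  · rw [if_pos h, if_neg (by omega), eg_fold_A, eg_fold_ends, List.nil_append, List.nil_append,
      List.foldl_reverse]
    have := eg_foldr_B one_ls 0
      (line_size - (one_ls.foldl (· + ·) 0 + (one_ls.length : Int) - 1)) line_size (by omega)
    exact (congrArg Prod.fst this).symm
  · rw [if_neg h, if_pos (by omega)]
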